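-- pv_equiv track=rewrite | github.com/vem54/gpu-jason | gpu_poker_cfr/solvers/semi_vector_leduc_numba.py | _facing_bet
-- ===== SOURCE A (Python) =====
-- def _facing_bet(actions):
--     if not actions:
--         return False
--     for i in range(len(actions) - 1, -1, -1):
--         if actions[i] == 'b':
--             return True
--         if actions[i] == 'c' and i > 0 and actions[i-1] == 'b':
--             return False
--     return False
-- ===== SOURCE B (Python) =====
-- def _facing_bet(actions):
--     # Locate the last bet in one forward pass, then decide in O(1):
--     # no bet -> False; a bet immediately answered by 'c' -> False; else True.
--     last_b = -1
--     for i, a in enumerate(actions):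
--         if a == 'b':
--             last_b = i
--     if last_b == -1:
--         return False
--     return not (last_b + 1 < len(actions) and actions[last_b + 1] == 'c')
-- ===== Notes on version B (the rewrite author's own statement) =====
-- stated objective: simpler
-- what changed: Replaces the backward scan with early returns by a forward locate-last-bet pass followed by a single O(1) decision (bet exists and is not immediately called).
import Mathlib
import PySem

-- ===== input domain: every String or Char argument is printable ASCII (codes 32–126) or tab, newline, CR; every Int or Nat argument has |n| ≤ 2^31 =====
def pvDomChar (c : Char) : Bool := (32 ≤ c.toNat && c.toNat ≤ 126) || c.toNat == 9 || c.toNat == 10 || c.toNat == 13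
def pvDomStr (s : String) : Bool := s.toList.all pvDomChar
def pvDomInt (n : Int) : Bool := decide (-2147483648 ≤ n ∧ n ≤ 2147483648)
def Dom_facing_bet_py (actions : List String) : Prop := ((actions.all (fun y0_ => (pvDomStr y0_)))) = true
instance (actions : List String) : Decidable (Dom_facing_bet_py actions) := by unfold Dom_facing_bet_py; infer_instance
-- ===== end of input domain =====

-- B replaces A's backward scan with early returns by a forward locate-last-bet pass and an O(1) decision (simpler decomposition).


-- ===== PORT A =====
-- the 'for i in range(len(actions)-1, -1, -1)' loop with its two early returns
def facingA_loop (actions : List String) : List Int → Bool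
  | [] => false
  | i :: rest =>
    if PySem.List.pyGetD actions i "" == "b" then true
    else if PySem.List.pyGetD actions i "" == "c" && decide (0 < i)
            && (PySem.List.pyGetD actions (i - 1) "" == "b") then false
    else facingA_loop actions rest

def facing_bet_py (actions : List String) : Bool :=
  if actions.isEmpty then false
  else facingA_loop actions (PySem.List.pyRange (PySem.List.len actions - 1) (-1) (-1))

-- ===== PORT B =====
-- the forward pass: index of the last 'b', or -1
def altLastB (actions : List String) : Int :=
  (PySem.List.enumerate actions 0).foldl (fun last_b p => if p.2 == "b" then p.1 else last_b) (-1)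

def facing_bet_py_alt (actions : List String) : Bool :=
  let last_b := altLastB actions
  if last_b == -1 then false
  else !(decide (last_b + 1 < PySem.List.len actions)
         && (PySem.List.pyGetD actions (last_b + 1) "" == "c"))

-- ===== PRECONDITION & SPEC =====
def Spec_facing_bet_py (actions : List String) (out : Bool) : Prop := out = facing_bet_py_alt actions
instance (actions : List String) (out : Bool) : Decidable (Spec_facing_bet_py actions out) := by unfold Spec_facing_bet_py; infer_instance

-- ===== CLAIM (what is proved, stated in full; the proofs are below) =====
def Claim_equal_facing_bet_py : Prop := ∀ (actions : List String), Dom_facing_bet_py actions → Spec_facing_bet_py actions (facing_bet_py actions)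

-- ===== LEMMAS AND PROOFS =====

-- both programs, read from the right, obey the same one-step recurrence
def rstep (x : String) (xs : List String) (prev : Bool) : Bool :=
  if x == "b" then true
  else if x == "c" && (xs.getLast? == some "b") then false
  else prev

lemma alt_unfold (ys : List String) :
    facing_bet_py_alt ys =
      if altLastB ys == -1 then false
      else !(decide (altLastB ys + 1 < PySem.List.len ys)
             && (PySem.List.pyGetD ys (altLastB ys + 1) "" == "c")) := rfl

lemma lastB_append (xs : List String) (x : String) :
    altLastB (xs ++ [x]) = if x == "b" then (xs.length : Int) else altLastB xs := by
  simp [altLastB, PySem.List.enumerate_append, PySem.List.enumerate_cons,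
        PySem.List.enumerate_nil, List.foldl_append]

lemma lastB_spec (xs : List String) :
    (altLastB xs = -1 ∧ ∀ k : Nat, k < xs.length → xs[k]? ≠ some "b") ∨
    (∃ j : Nat, altLastB xs = (j : Int) ∧ j < xs.length ∧ xs[j]? = some "b" ∧
      ∀ k : Nat, k < xs.length → xs[k]? = some "b" → k ≤ j) := by
  induction xs using List.reverseRecOn with
  | nil => left; exact ⟨rfl, by simp⟩
  | append_singleton xs x ih =>
    rw [lastB_append]
    by_cases hx : x = "b"
    · right
      refine ⟨xs.length, by simp [hx], by simp, by simp [hx], ?_⟩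
      intro k hk _
      rw [List.length_append, List.length_cons, List.length_nil] at hk
      omega
    · have hx' : (x == "b") = false := by simp [hx]
      rw [hx', if_neg (by simp)]
      rcases ih with ⟨h1, h2⟩ | ⟨j, hj, hjl, hjb, hmax⟩
      · left
        refine ⟨h1, ?_⟩
        intro k hk
        rw [List.length_append, List.length_cons, List.length_nil] at hk
        rcases Nat.lt_or_ge k xs.length with hlt | hge
        · rw [List.getElem?_append_left hlt]; exact h2 k hlt
        · have : k = xs.length := by omega
          subst this
          rw [List.getElem?_concat_length]
          simp [hx]
      · right
        refine ⟨j, hj, ?_, by rw [List.getElem?_append_left hjl]; exact hjb, ?_⟩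
        · rw [List.length_append, List.length_cons, List.length_nil]; omega
        · intro k hk hkb
          rw [List.length_append, List.length_cons, List.length_nil] at hk
          rcases Nat.lt_or_ge k xs.length with hlt | hge
          · exact hmax k hlt (by rwa [List.getElem?_append_left hlt] at hkb)
          · have : k = xs.length := by omega
            subst this
            rw [List.getElem?_concat_length] at hkb
            simp [hx] at hkb

lemma loopA_congr (xs : List String) (x : String) (is : List Int)
    (h : ∀ i ∈ is, 0 ≤ i ∧ i < (xs.length : Int)) :
    facingA_loop (xs ++ [x]) is = facingA_loop xs is := by
  induction is with
  | nil => rfl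
  | cons i rest ih =>
    have hi := h i (by simp)
    have hget : PySem.List.pyGetD (xs ++ [x]) i "" = PySem.List.pyGetD xs i "" := by
      rw [PySem.List.pyGetD_eq_getElem (xs ++ [x]) "" hi.1
            (by rw [List.length_append]; push_cast; omega),
          PySem.List.pyGetD_eq_getElem xs "" hi.1 hi.2]
      exact List.getElem_append_left (by omega)
    have hrest : facingA_loop (xs ++ [x]) rest = facingA_loop xs rest :=
      ih (fun j hj => h j (List.mem_cons_of_mem _ hj))
    by_cases hpos : 0 < i
    · have hget1 : PySem.List.pyGetD (xs ++ [x]) (i - 1) "" = PySem.List.pyGetD xs (i - 1) "" := by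
        rw [PySem.List.pyGetD_eq_getElem (xs ++ [x]) "" (by omega)
              (by rw [List.length_append]; push_cast; omega),
            PySem.List.pyGetD_eq_getElem xs "" (by omega) (by omega)]
        exact List.getElem_append_left (by omega)
      simp only [facingA_loop, hget, hget1, hrest]
    · have hz : decide (0 < i) = false := by simpa using hpos
      simp only [facingA_loop, hget, hz, Bool.and_false, Bool.false_and, Bool.false_eq_true,
        if_false, hrest]

lemma stepA (xs : List String) (x : String) :
    facing_bet_py (xs ++ [x]) = rstep x xs (facing_bet_py xs) := by
  have hlen : PySem.List.len (xs ++ [x]) - 1 = (xs.length : Int) := by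
    simp [PySem.List.len_eq]
  rw [facing_bet_py, if_neg (by simp), hlen, PySem.List.pyRange_neg_one_cons (by omega)]
  have hx : PySem.List.pyGetD (xs ++ [x]) (xs.length : Int) "" = x := by
    simp [PySem.List.pyGetD_natCast]
  simp only [facingA_loop, hx]
  by_cases hxb : x = "b"
  · simp [rstep, hxb]
  · have hxb' : (x == "b") = false := by simp [hxb]
    rw [hxb', if_neg (by simp)]
    by_cases hxe : xs = []
    · subst hxe
      have h0 : PySem.List.pyRange (-1) (-1) (-1) = ([] : List Int) :=
        PySem.List.pyRange_neg_one_eq_nil (by omega)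
      simp [rstep, hxb', facing_bet_py, facingA_loop, h0]
    · have hlpos : 0 < xs.length := List.length_pos_iff.mpr hxe
      have hprev : PySem.List.pyGetD (xs ++ [x]) ((xs.length : Int) - 1) "" =
          (xs.getLast?).getD "" := by
        have hcast : (xs.length : Int) - 1 = ((xs.length - 1 : Nat) : Int) := by omega
        rw [hcast, PySem.List.pyGetD_natCast]
        rw [List.getD, List.getElem?_append_left (by omega), List.getLast?_eq_getElem?]
      have htail : facingA_loop (xs ++ [x]) (PySem.List.pyRange ((xs.length : Int) - 1) (-1) (-1))
          = facing_bet_py xs := by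
        rw [loopA_congr xs x _ (by
          intro i hi
          rw [PySem.List.mem_pyRange_neg_one] at hi
          omega)]
        rw [facing_bet_py, if_neg (by simp [hxe]), PySem.List.len_eq]
      rw [htail]
      by_cases hlast : xs.getLast? = some "b"
      · have hpos : decide ((0:Int) < (xs.length : Int)) = true := by
          simp only [decide_eq_true_eq]; omega
        rw [hprev, hlast, hpos]
        simp [rstep, hxb', hlast]
      · have hcond : ((x == "c") && decide ((0:Int) < (xs.length : Int))
            && ((xs.getLast?).getD "" == "b")) = false := by
          rcases hgl : xs.getLast? with _ | y
          · exact absurd hgl (by simp [List.getLast?_eq_none_iff, hxe])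
          · have hy : (y == "b") = false := by
              simp only [hgl] at hlast
              simpa using fun h => hlast (by rw [h])
            simp [hy]
        rw [hprev, hcond, if_neg (by simp)]
        simp [rstep, hxb', hlast]

lemma pyGetD_append_left (xs : List String) (x : String) (k : Nat) (hk : k < xs.length) :
    PySem.List.pyGetD (xs ++ [x]) (k : Int) "" = PySem.List.pyGetD xs (k : Int) "" := by
  simp [PySem.List.pyGetD_natCast, List.getD, List.getElem?_append_left hk]

lemma stepB (xs : List String) (x : String) :
    facing_bet_py_alt (xs ++ [x]) = rstep x xs (facing_bet_py_alt xs) := by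
  rw [alt_unfold, lastB_append]
  by_cases hxb : x = "b"
  · have h1 : ((xs.length : Int) == -1) = false := by
      simp only [beq_eq_false_iff_ne, ne_eq]; omega
    simp [hxb, h1, rstep, PySem.List.len_eq]
  · have hxb' : (x == "b") = false := by simp [hxb]
    simp only [hxb', Bool.false_eq_true, if_false]
    rcases lastB_spec xs with ⟨h1, _⟩ | ⟨j, hj, hjl, hjb, hmax⟩
    · rw [h1, if_pos (by decide)]
      simp [rstep, hxb', alt_unfold, h1]
    · rw [hj]
      have hne : ((j : Int) == -1) = false := by
        simp only [beq_eq_false_iff_ne, ne_eq]; omega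
      rw [if_neg (by simp only [hne]; exact Bool.false_ne_true)]
      have hglast : xs.getLast? = xs[xs.length - 1]? := List.getLast?_eq_getElem?
      by_cases hcase : x = "c" ∧ xs.getLast? = some "b"
      · -- the last element of xs is 'b', so j = xs.length - 1 and the new 'c' calls it
        have hxe : xs ≠ [] := by intro h; subst h; simp at hjl
        have hlpos : 0 < xs.length := List.length_pos_iff.mpr hxe
        have hj' : j = xs.length - 1 := by
          have := hmax (xs.length - 1) (by omega) (by rw [← hglast]; exact hcase.2)
          omega
        have hc1 : decide ((j : Int) + 1 < PySem.List.len (xs ++ [x])) = true := by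
          rw [PySem.List.len_eq]
          simp only [List.length_append, List.length_cons, List.length_nil,
            decide_eq_true_eq]
          push_cast; omega
        have hc2 : PySem.List.pyGetD (xs ++ [x]) ((j : Int) + 1) "" = x := by
          have h : (j : Int) + 1 = (xs.length : Int) := by omega
          rw [h]; simp [PySem.List.pyGetD_natCast]
        rw [hc1, hc2]
        simp [rstep, hcase.1, hcase.2]
      · have hrs : rstep x xs (facing_bet_py_alt xs) = facing_bet_py_alt xs := by
          rw [rstep, if_neg (by simp [hxb]), if_neg ?_]
          simp only [Bool.and_eq_true, beq_iff_eq, not_and]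
          intro h1 h2
          exact hcase ⟨h1, by simpa using h2⟩
        rw [hrs, alt_unfold, hj,
            if_neg (by simp only [hne]; exact Bool.false_ne_true)]
        rcases Nat.lt_or_ge (j + 1) xs.length with hlt | hge
        · have e1 : decide ((j : Int) + 1 < PySem.List.len (xs ++ [x])) = true := by
            rw [PySem.List.len_eq]
            simp only [List.length_append, List.length_cons, List.length_nil,
              decide_eq_true_eq]
            push_cast; omega
          have e2 : decide ((j : Int) + 1 < PySem.List.len xs) = true := by
            rw [PySem.List.len_eq]
            simp only [decide_eq_true_eq]; omega
          have e3 : PySem.List.pyGetD (xs ++ [x]) ((j : Int) + 1) ""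
              = PySem.List.pyGetD xs ((j : Int) + 1) "" := by
            have hcast : (j : Int) + 1 = ((j + 1 : Nat) : Int) := by omega
            rw [hcast]; exact pyGetD_append_left xs x (j + 1) hlt
          rw [e1, e2, e3]
        · -- j is the last index of xs: xs ends in 'b', hence x ≠ 'c'
          have hj' : j = xs.length - 1 := by omega
          have hlastb : xs.getLast? = some "b" := by rw [hglast, ← hj']; exact hjb
          have hxc : x ≠ "c" := fun h => hcase ⟨h, hlastb⟩
          have e2 : decide ((j : Int) + 1 < PySem.List.len xs) = false := by
            rw [PySem.List.len_eq]
            simp only [decide_eq_false_iff_not, not_lt]; omega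
          have e1 : decide ((j : Int) + 1 < PySem.List.len (xs ++ [x])) = true := by
            rw [PySem.List.len_eq]
            simp only [List.length_append, List.length_cons, List.length_nil,
              decide_eq_true_eq]
            push_cast; omega
          have e3 : PySem.List.pyGetD (xs ++ [x]) ((j : Int) + 1) "" = x := by
            have h : (j : Int) + 1 = (xs.length : Int) := by omega
            rw [h]; simp [PySem.List.pyGetD_natCast]
          rw [e1, e2, e3]
          simp [hxc]

-- ===== VERDICT (by name: the statement is the Claim_ definition above) =====
theorem facing_bet_py_spec : Claim_equal_facing_bet_py := by
  intro actions hdom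
  unfold Spec_facing_bet_py
  clear hdom
  induction actions using List.reverseRecOn with
  | nil => rfl
  | append_singleton xs x ih => rw [stepA, stepB, ih]
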